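-- pv_equiv track=rewrite | github.com/sandeepmekala/competitive-programming | dsa/concepts/05_binarysearch/python/l1482_minimum_numberof_daysto_makem_bouquets.py | can_make
-- ===== SOURCE A (Python) =====
-- def can_make(bloom_day, day, m, k):
--     consecutive = 0
--     bouquets = 0
--
--     for b in bloom_day:
--         if b <= day:
--             consecutive += 1
--         else:
--             bouquets += consecutive // k
--             consecutive = 0
--
--     bouquets += consecutive // k
--     return bouquets >= m
-- ===== SOURCE B (Python) =====
-- def can_make(bloom_day, day, m, k):
--     # stage 1: collect indices of blockers (flowers not yet bloomed), padded with virtual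
--     # blockers at -1 and n; stage 2: each adjacent blocker pair (p, q) encloses a maximal
--     # bloomed run of length q - p - 1, contributing (q - p - 1) // k bouquets.
--     n = len(bloom_day)
--     blockers = [-1] + [i for i, b in enumerate(bloom_day) if b > day] + [n]
--     total = sum((q - p - 1) // k for p, q in zip(blockers, blockers[1:]))
--     return total >= m
-- ===== Notes on version B (the rewrite author's own statement) =====
-- stated objective: alternative
-- what changed: Instead of a running consecutive counter reset at blockers, B first materialises the list of blocker indices (padded with sentinels -1 and n) and then aggregates over adjacent blocker pairs, each gap (q - p - 1) // k counting the bouquets in the enclosed bloomed run.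
import Mathlib
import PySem

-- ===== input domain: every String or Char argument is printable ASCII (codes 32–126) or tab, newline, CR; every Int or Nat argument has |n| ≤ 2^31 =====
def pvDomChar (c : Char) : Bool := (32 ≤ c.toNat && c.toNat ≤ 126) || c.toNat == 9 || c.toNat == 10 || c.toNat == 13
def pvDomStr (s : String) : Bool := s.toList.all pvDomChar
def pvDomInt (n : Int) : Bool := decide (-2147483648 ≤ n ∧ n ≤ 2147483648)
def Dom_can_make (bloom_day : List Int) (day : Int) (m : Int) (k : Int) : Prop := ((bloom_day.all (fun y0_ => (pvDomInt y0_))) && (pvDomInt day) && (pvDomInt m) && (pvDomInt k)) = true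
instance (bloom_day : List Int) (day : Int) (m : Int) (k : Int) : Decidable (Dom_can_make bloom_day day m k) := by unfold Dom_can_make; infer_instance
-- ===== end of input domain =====

-- B replaces A's counter-with-reset scan by a blocker-index list with sentinels aggregated
-- over adjacent pairs (same cost); return-value equivalence proved for k ≠ 0.

-- ===== PORT A =====
def can_make (bloom_day : List Int) (day : Int) (m : Int) (k : Int) : Bool :=
  let s := bloom_day.foldl
    (fun (s : Int × Int) b =>
      if b ≤ day then (s.1 + 1, s.2) else (0, s.2 + PySem.Int.floordiv s.1 k))
    (0, 0)
  decide (s.2 + PySem.Int.floordiv s.1 k ≥ m)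

-- ===== PORT B =====
def can_make_alt (bloom_day : List Int) (day : Int) (m : Int) (k : Int) : Bool :=
  let n : Int := bloom_day.length
  let blockers : List Int :=
    [-1] ++ ((PySem.List.enumerate bloom_day).filterMap
      (fun p => if p.2 > day then some p.1 else none)) ++ [n]
  let total := ((blockers.zip (blockers.drop 1)).map
      (fun p => PySem.Int.floordiv (p.2 - p.1 - 1) k)).sum
  decide (total ≥ m)

-- ===== PRECONDITION & SPEC =====
-- Pre_ excludes exactly k = 0, on which Python A raises ZeroDivisionError (and B raises too).
def Pre_can_make (bloom_day : List Int) (day : Int) (m : Int) (k : Int) : Prop := k ≠ 0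
instance (bloom_day : List Int) (day : Int) (m : Int) (k : Int) : Decidable (Pre_can_make bloom_day day m k) := by unfold Pre_can_make; infer_instance
def pvWitness_can_make : List Int × Int × Int × Int := ([1, 10, 3, 10, 2], 3, 1, 1)

def Spec_can_make (bloom_day : List Int) (day : Int) (m : Int) (k : Int) (out : Bool) : Prop := out = can_make_alt bloom_day day m k
instance (bloom_day : List Int) (day : Int) (m : Int) (k : Int) (out : Bool) : Decidable (Spec_can_make bloom_day day m k out) := by unfold Spec_can_make; infer_instance

-- ===== CLAIM (what is proved, stated in full; the proofs are below) =====
def Claim_equal_can_make : Prop := ∀ (bloom_day : List Int) (day : Int) (m : Int) (k : Int), Dom_can_make bloom_day day m k → Pre_can_make bloom_day day m k → Spec_can_make bloom_day day m k (can_make bloom_day day m k)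

-- ===== LEMMAS AND PROOFS =====

-- abstract run decomposition used only by the proofs: leading bloomed-run length and remainder
def pvTakeRun (day : Int) : List Int → Int × List Int
  | [] => (0, [])
  | b :: t =>
    if b ≤ day then
      let p := pvTakeRun day t
      (p.1 + 1, p.2)
    else (0, b :: t)

def pvTotal (day k : Int) (l : List Int) : Int :=
  match l with
  | [] => 0
  | b :: t =>
    let p := pvTakeRun day (b :: t)
    match hp : p.2 with
    | [] => PySem.Int.floordiv p.1 k
    | _ :: t' =>
      have _hlen : t'.length < (b :: t).length := by
        have h : (pvTakeRun day (b :: t)).2.length ≤ (b :: t).length := by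
          have : ∀ (l : List Int), (pvTakeRun day l).2.length ≤ l.length := by
            intro l
            induction l with
            | nil => simp [pvTakeRun]
            | cons c s ih => simp only [pvTakeRun]; split
                             · simpa using Nat.le_succ_of_le ih
                             · simp
          exact this (b :: t)
        rw [hp] at h
        simpa using Nat.lt_of_lt_of_le (Nat.lt_succ_self _) h
      PySem.Int.floordiv p.1 k + pvTotal day k t'
  termination_by l.length
  decreasing_by omega

def pvTailTotal (day k : Int) : List Int → Int
  | [] => 0
  | _ :: t => pvTotal day k t

theorem pvTotal_nil (day k : Int) : pvTotal day k [] = 0 := by rw [pvTotal]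

theorem pvTotal_eq (day k : Int) (l : List Int) :
    pvTotal day k l =
      PySem.Int.floordiv (pvTakeRun day l).1 k + pvTailTotal day k (pvTakeRun day l).2 := by
  match l with
  | [] => rw [pvTotal_nil]; simp [pvTakeRun, pvTailTotal, PySem.Int.floordiv]
  | b :: t =>
    rw [pvTotal]
    split
    · next hp => rw [hp]; simp [pvTailTotal]
    · next x t' hp => simp only [pvTailTotal, hp]

-- invariant for A's fold, started from an arbitrary open run length c and accumulator bq
theorem pvFold_inv (day k : Int) (l : List Int) : ∀ (c bq : Int),
    (l.foldl
        (fun (s : Int × Int) b =>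
          if b ≤ day then (s.1 + 1, s.2) else (0, s.2 + PySem.Int.floordiv s.1 k))
        (c, bq)).2
      + PySem.Int.floordiv (l.foldl
        (fun (s : Int × Int) b =>
          if b ≤ day then (s.1 + 1, s.2) else (0, s.2 + PySem.Int.floordiv s.1 k))
        (c, bq)).1 k
    = bq + PySem.Int.floordiv (c + (pvTakeRun day l).1) k
        + pvTailTotal day k (pvTakeRun day l).2 := by
  induction l with
  | nil => intro c bq; simp [pvTakeRun, pvTailTotal]
  | cons b t ih =>
    intro c bq
    by_cases hb : b ≤ day
    · simp only [List.foldl_cons, if_pos hb]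
      rw [ih (c + 1) bq]
      simp only [pvTakeRun, if_pos hb]
      rw [show c + ((pvTakeRun day t).1 + 1) = c + 1 + (pvTakeRun day t).1 from by ring]
    · simp only [List.foldl_cons, if_neg hb]
      rw [ih 0 (bq + PySem.Int.floordiv c k)]
      simp only [pvTakeRun, if_neg hb]
      rw [show pvTailTotal day k (b :: t) = pvTotal day k t from rfl, pvTotal_eq day k t]
      rw [show c + (0:Int) = c from by ring]
      ring

-- B-side abstraction 1: the gap sum over the padded blocker list, as a recursion carrying prev
def pvGS (k prev : Int) (js : List Int) (last : Int) : Int :=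
  match js with
  | [] => PySem.Int.floordiv (last - prev - 1) k
  | j :: t => PySem.Int.floordiv (j - prev - 1) k + pvGS k j t last

-- the zip-with-tail map-sum of B's port equals pvGS
theorem pvZipsum (k : Int) (js : List Int) : ∀ (prev last : Int),
    (((prev :: (js ++ [last])).zip ((prev :: (js ++ [last])).drop 1)).map
      (fun p => PySem.Int.floordiv (p.2 - p.1 - 1) k)).sum = pvGS k prev js last := by
  induction js with
  | nil => intro prev last; simp [pvGS]
  | cons j t ih =>
    intro prev last
    simp only [List.cons_append, List.drop_succ_cons, List.drop_zero, List.zip_cons_cons,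
      List.map_cons, List.sum_cons, pvGS]
    have := ih j last
    simp only [List.drop_succ_cons, List.drop_zero] at this
    rw [this]

-- B-side abstraction 2: the blocker-index list
def pvIdx (day i : Int) : List Int → List Int
  | [] => []
  | b :: t => if b > day then i :: pvIdx day (i + 1) t else pvIdx day (i + 1) t

theorem pvIdx_eq (day : Int) (l : List Int) : ∀ (s : Int),
    (PySem.List.enumerate l s).filterMap
      (fun p => if p.2 > day then some p.1 else none) = pvIdx day s l := by
  induction l with
  | nil => intro s; simp [PySem.List.enumerate_nil, pvIdx]
  | cons b t ih =>
    intro s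
    rw [PySem.List.enumerate_cons]
    by_cases hb : b > day
    · simp [hb, pvIdx, ih]
    · simp [hb, pvIdx, ih]

-- the gap sum over blocker indices equals the run decomposition total
theorem pvGS_idx (day k : Int) (l : List Int) : ∀ (i prev : Int),
    pvGS k prev (pvIdx day i l) (i + l.length) =
      PySem.Int.floordiv (i - prev - 1 + (pvTakeRun day l).1) k
        + pvTailTotal day k (pvTakeRun day l).2 := by
  induction l with
  | nil =>
    intro i prev
    simp only [pvIdx, pvGS, pvTakeRun, pvTailTotal, List.length_nil, Nat.cast_zero,
      add_zero]
  | cons b t ih =>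
    intro i prev
    have hlen : i + ((b :: t).length : Int) = (i + 1) + (t.length : Int) := by
      push_cast [List.length_cons]; ring
    by_cases hb : b > day
    · simp only [pvIdx, if_pos hb, pvGS, hlen]
      rw [ih (i + 1) i]
      have hnb : ¬ b ≤ day := by omega
      simp only [pvTakeRun, if_neg hnb]
      rw [show pvTailTotal day k (b :: t) = pvTotal day k t from rfl, pvTotal_eq day k t]
      rw [show i + 1 - i - 1 + (pvTakeRun day t).1 = (pvTakeRun day t).1 from by ring,
          show i - prev - 1 + (0:Int) = i - prev - 1 from by ring]
    · simp only [pvIdx, if_neg hb, hlen]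
      rw [ih (i + 1) prev]
      have hbb : b ≤ day := by omega
      simp only [pvTakeRun, if_pos hbb]
      rw [show i + 1 - prev - 1 + (pvTakeRun day t).1
            = i - prev - 1 + ((pvTakeRun day t).1 + 1) from by ring]

-- ===== VERDICT (by name: the statement is the Claim_ definition above) =====
theorem can_make_spec : Claim_equal_can_make := by
  intro bloom_day day m k _ _
  unfold Spec_can_make can_make can_make_alt
  have hA := pvFold_inv day k bloom_day 0 0
  simp only [ge_iff_le]
  rw [hA]
  simp only [pvIdx_eq day bloom_day 0, List.cons_append, List.nil_append]
  rw [pvZipsum k (pvIdx day 0 bloom_day) (-1) (bloom_day.length : Int)]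
  have h2 := pvGS_idx day k bloom_day 0 (-1)
  rw [show (0:Int) + (bloom_day.length : Int) = (bloom_day.length : Int) from by ring] at h2
  rw [h2, show (0:Int) - (-1) - 1 + (pvTakeRun day bloom_day).1
        = (pvTakeRun day bloom_day).1 from by ring]
  norm_num
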